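-- pv_equiv track=rewrite | github.com/looloolalaa/Python-Challenge | PRO_신고결과.py | solution
-- ===== SOURCE A (Python) =====
-- from collections import defaultdict
--
-- def solution(id_list, report, k):
--     reported = defaultdict(set)
--     report_count = defaultdict(int)
--
--     for s in set(report):
--         a, b = s.split()
--         reported[a].add(b)
--         report_count[b] += 1
--
--     return [len(list(filter(lambda x: report_count[x] >= k, reported[i]))) for i in id_list]
-- ===== SOURCE B (Python) =====
-- from collections import defaultdict
--
-- def solution(id_list, report, k):
--     # Inverse index: reportee -> list of reporters (one entry per distinct report string).
--     by_target = defaultdict(list)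
--     for s in set(report):
--         a, b = s.split()
--         by_target[b].append(a)
--     result = defaultdict(int)
--     for reporters in by_target.values():
--         if len(reporters) >= k:
--             for a in set(reporters):
--                 result[a] += 1
--     return [result[i] for i in id_list]
-- ===== Notes on version B (the rewrite author's own statement) =====
-- stated objective: alternative
-- what changed: B inverts A's index: instead of a reporter->reportees map filtered per id against a separate count dict, B builds one reportee->reporters list and, for each target with at least k entries, scatters one credit to each of its distinct reporters, then reads the credits off in id_list order.
import Mathlib
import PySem

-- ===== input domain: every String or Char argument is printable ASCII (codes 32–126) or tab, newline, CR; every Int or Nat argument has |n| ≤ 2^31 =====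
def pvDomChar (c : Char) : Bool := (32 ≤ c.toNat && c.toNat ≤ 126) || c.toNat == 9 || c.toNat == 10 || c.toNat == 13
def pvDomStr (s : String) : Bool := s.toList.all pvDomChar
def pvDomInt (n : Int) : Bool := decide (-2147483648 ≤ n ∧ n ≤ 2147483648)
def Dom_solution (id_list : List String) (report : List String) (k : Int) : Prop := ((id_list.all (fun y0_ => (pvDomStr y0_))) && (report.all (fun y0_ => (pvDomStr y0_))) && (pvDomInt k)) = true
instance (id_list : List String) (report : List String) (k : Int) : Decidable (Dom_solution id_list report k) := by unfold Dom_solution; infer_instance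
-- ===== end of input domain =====

-- B replaces A's forward reporter->reportees index plus per-id filtering by an inverse
-- reportee->reporters index: each target with >= k entries scatters one credit to each of
-- its distinct reporters (objective: alternative decomposition, same asymptotic cost).


-- ===== PORT A =====
-- 'for s in set(report)' builds two dicts that are only looked up afterwards, so the
-- hash iteration order cannot affect the result; ported via PySem.Set.ofList.
def solution (id_list : List String) (report : List String) (k : Int) : List Int :=
  let loop := (PySem.Set.ofList report).foldl
    (fun (st : PySem.Dict String (PySem.Set String) × PySem.Dict String Int) s =>
      let toks := PySem.Str.split₀ s
      let a := toks.getD 0 ""      -- 'a, b = s.split()': exactly two tokens under Pre_solution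
      let b := toks.getD 1 ""
      (st.1.modify a PySem.Set.empty (fun t => PySem.Set.add t b),
       st.2.modify b 0 (· + 1)))
    (PySem.Dict.empty, PySem.Dict.empty)
  let reported := loop.1
  let report_count := loop.2
  id_list.map (fun i =>
    (((reported.getD i PySem.Set.empty).filter
        (fun x => decide (report_count.getD x 0 ≥ k))).length : Int))

-- ===== PORT B =====
def solution_alt (id_list : List String) (report : List String) (k : Int) : List Int :=
  let by_target := (PySem.Set.ofList report).foldl
    (fun (d : PySem.Dict String (List String)) s =>
      let toks := PySem.Str.split₀ s
      let a := toks.getD 0 ""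
      let b := toks.getD 1 ""
      d.modify b [] (· ++ [a]))
    PySem.Dict.empty
  let result := by_target.values.foldl
    (fun (d : PySem.Dict String Int) reporters =>
      if decide ((reporters.length : Int) ≥ k) then
        (PySem.Set.ofList reporters).foldl (fun d a => d.modify a 0 (· + 1)) d
      else d)
    PySem.Dict.empty
  id_list.map (fun i => result.getD i 0)

-- ===== PRECONDITION & SPEC =====
-- Pre_ excludes exactly the inputs where 'a, b = s.split()' raises ValueError
-- (a report entry that does not consist of exactly two whitespace-separated words);
-- A returns on all other inputs.
def Pre_solution (_id_list : List String) (report : List String) (_k : Int) : Prop :=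
  ∀ s ∈ report, (PySem.Str.split₀ s).length = 2
instance (id_list : List String) (report : List String) (k : Int) : Decidable (Pre_solution id_list report k) := by unfold Pre_solution; infer_instance
def pvWitness_solution : List String × List String × Int :=
  (["muzi", "frodo", "apeach"], ["muzi frodo", "apeach frodo", "muzi frodo"], 2)

def Spec_solution (id_list : List String) (report : List String) (k : Int) (out : List Int) : Prop := out = solution_alt id_list report k
instance (id_list : List String) (report : List String) (k : Int) (out : List Int) : Decidable (Spec_solution id_list report k out) := by unfold Spec_solution; infer_instance

-- ===== CLAIM (what is proved, stated in full; the proofs are below) =====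
def Claim_equal_solution : Prop := ∀ (id_list : List String) (report : List String) (k : Int), Dom_solution id_list report k → Pre_solution id_list report k → Spec_solution id_list report k (solution id_list report k)

-- ===== LEMMAS AND PROOFS =====

-- A's reported dict, read at key i: the set of reportees paired with reporter i
theorem pv_repD_getD (P : List (String × String))
    (d : PySem.Dict String (PySem.Set String)) (i : String) :
    ((P.foldl (fun d p => d.modify p.1 PySem.Set.empty (fun t => PySem.Set.add t p.2)) d).getD
        i PySem.Set.empty)
      = PySem.Set.update (d.getD i PySem.Set.empty)
          ((P.filter (fun p => p.1 == i)).map (·.2)) := by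
  induction P generalizing d with
  | nil => simp [PySem.Set.update]
  | cons p P ih =>
      simp only [List.foldl_cons, ih, List.filter_cons]
      rw [PySem.Dict.getD_modify]
      by_cases h : p.1 = i
      · simp [h, PySem.Set.update_cons]
      · simp [h, Ne.symm h]

-- counting fold, read at key x
theorem pv_cntD_getD (P : List (String × String)) (x : String) :
    ((P.foldl (fun d (p : String × String) => d.modify p.2 0 (· + 1))
        (PySem.Dict.empty : PySem.Dict String Int)).getD x 0)
      = ((P.map (·.2)).count x : Int) := by
  have h : P.foldl (fun d (p : String × String) => d.modify p.2 0 (· + 1))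
        (PySem.Dict.empty : PySem.Dict String Int)
      = (P.map (·.2)).foldl (fun d x => d.modify x 0 (· + 1)) PySem.Dict.empty := by
    rw [List.foldl_map]
  rw [h, PySem.Dict.getD_foldl_modify_add_one]
  simp

-- B's inverse index, read at key b: the reporters of b, in pair order
theorem pv_bytD_getD (P : List (String × String))
    (d : PySem.Dict String (List String)) (b : String) :
    ((P.foldl (fun d p => d.modify p.2 [] (· ++ [p.1])) d).getD b [])
      = d.getD b [] ++ (P.filter (fun p => p.2 == b)).map (·.1) := by
  induction P generalizing d with
  | nil => simp
  | cons p P ih =>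
      simp only [List.foldl_cons, ih, List.filter_cons]
      rw [PySem.Dict.getD_modify]
      by_cases h : p.2 = b
      · simp [h]
      · simp [h, Ne.symm h]

-- B's scatter fold, read at key i
theorem pv_resD_getD (k : Int) (i : String) (V : List (List String))
    (d : PySem.Dict String Int) :
    ((V.foldl (fun d v => if decide ((v.length : Int) ≥ k) then
        (PySem.Set.ofList v).foldl (fun d a => d.modify a 0 (· + 1)) d else d) d).getD i 0)
      = d.getD i 0
        + ((V.filter (fun v => decide ((v.length : Int) ≥ k)
              && (PySem.Set.ofList v).contains i)).length : Int) := by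
  induction V generalizing d with
  | nil => simp
  | cons v V ih =>
      simp only [List.foldl_cons, List.filter_cons]
      by_cases hk : (v.length : Int) ≥ k
      · have hdk : decide ((v.length : Int) ≥ k) = true := decide_eq_true hk
        rw [if_pos hdk, ih, PySem.Dict.getD_foldl_modify_add_one, hdk, Bool.true_and]
        by_cases hm : i ∈ v
        · have hc : (PySem.Set.ofList v).contains i = true := by
            simp [PySem.Set.contains_eq_listContains, PySem.Set.mem_ofList, hm]
          have h1 : (PySem.Set.ofList v).count i = 1 := by
            have hle := List.nodup_iff_count_le_one.mp (PySem.Set.nodup_ofList v) i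
            have hpos : 0 < (PySem.Set.ofList v).count i :=
              List.count_pos_iff.mpr ((PySem.Set.mem_ofList _ _).2 hm)
            omega
          rw [hc, if_pos rfl, h1, List.length_cons]
          push_cast
          ring
        · have hc : (PySem.Set.ofList v).contains i = false := by
            simp [PySem.Set.contains_eq_listContains, PySem.Set.mem_ofList, hm]
          have h0 : (PySem.Set.ofList v).count i = 0 :=
            List.count_eq_zero.mpr (fun hmem => hm ((PySem.Set.mem_ofList _ _).1 hmem))
          rw [hc, if_neg (by simp), h0]
          push_cast
          ring
      · have hdk : decide ((v.length : Int) ≥ k) = false := decide_eq_false hk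
        rw [if_neg (by simp [hdk]), ih, hdk, Bool.false_and, if_neg (by simp)]

-- multiplicity of target x among the pairs, as the length of its reporter list
theorem pv_count_len (P : List (String × String)) (x : String) :
    ((P.filter (fun p => p.2 == x)).map (·.1)).length = (P.map (·.2)).count x := by
  induction P with
  | nil => simp
  | cons p P ih =>
      by_cases h : p.2 = x
      · simp [h, ih]
      · simp [h, ih]

-- two nodup lists whose filtered members coincide have equally long filtrations
theorem pv_len_filter_eq {L1 L2 : List String} (h1 : L1.Nodup) (h2 : L2.Nodup)
    {q1 q2 : String → Bool} (h : ∀ x, (x ∈ L1 ∧ q1 x = true) ↔ (x ∈ L2 ∧ q2 x = true)) :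
    (L1.filter q1).length = (L2.filter q2).length := by
  have hperm : (L1.filter q1).Perm (L2.filter q2) := by
    rw [List.perm_ext_iff_of_nodup (h1.filter _) (h2.filter _)]
    intro x
    simpa [List.mem_filter] using h x
  exact hperm.length_eq

-- ===== VERDICT (by name: the statement is the Claim_ definition above) =====
theorem solution_spec : Claim_equal_solution := by
  intro id_list report k _ _
  unfold Spec_solution
  set g : String → String × String :=
    fun s => ((PySem.Str.split₀ s).getD 0 "", (PySem.Str.split₀ s).getD 1 "") with hg
  set P : List (String × String) := (PySem.Set.ofList report).map g with hP
  have hsplitA : (PySem.Set.ofList report).foldl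
      (fun (st : PySem.Dict String (PySem.Set String) × PySem.Dict String Int) s =>
        let toks := PySem.Str.split₀ s
        let a := toks.getD 0 ""
        let b := toks.getD 1 ""
        (st.1.modify a PySem.Set.empty (fun t => PySem.Set.add t b),
         st.2.modify b 0 (· + 1)))
      (PySem.Dict.empty, PySem.Dict.empty)
      = (P.foldl (fun d p => d.modify p.1 PySem.Set.empty (fun t => PySem.Set.add t p.2))
           PySem.Dict.empty,
         P.foldl (fun d (p : String × String) => d.modify p.2 0 (· + 1)) PySem.Dict.empty) := by
    rw [← PySem.List.foldl_prod_mk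
      (f := fun (d : PySem.Dict String (PySem.Set String)) (p : String × String) =>
        d.modify p.1 PySem.Set.empty (fun t => PySem.Set.add t p.2))
      (g := fun (d : PySem.Dict String Int) (p : String × String) => d.modify p.2 0 (· + 1))]
    rw [hP, List.foldl_map]
  have hsplitB : (PySem.Set.ofList report).foldl
      (fun (d : PySem.Dict String (List String)) s =>
        let toks := PySem.Str.split₀ s
        let a := toks.getD 0 ""
        let b := toks.getD 1 ""
        d.modify b [] (· ++ [a]))
      PySem.Dict.empty
      = P.foldl (fun d p => d.modify p.2 [] (· ++ [p.1])) PySem.Dict.empty := by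
    rw [hP, List.foldl_map]
  unfold solution solution_alt
  rw [hsplitA, hsplitB]
  dsimp only
  set byt := P.foldl (fun d p => d.modify p.2 [] (· ++ [p.1])) PySem.Dict.empty with hbyt
  have hnodup : byt.keys.Nodup := by
    rw [hbyt]
    exact PySem.Dict.nodup_keys_foldl_modify_key P (·.2) [] _ _ PySem.Dict.nodup_keys_empty
  have hkeys : byt.keys = PySem.Set.ofList (P.map (·.2)) := by
    rw [hbyt, PySem.Dict.keys_foldl_modify_key]
    simp [PySem.Dict.keys_empty, PySem.Set.update_nil_left]
  have hvals : byt.values = byt.keys.map (fun b => byt.getD b []) :=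
    PySem.Dict.values_eq_map_keys byt hnodup []
  apply List.map_congr_left
  intro i _
  -- A side
  rw [pv_repD_getD]
  rw [show (PySem.Dict.empty : PySem.Dict String (PySem.Set String)).getD i PySem.Set.empty
      = PySem.Set.empty from PySem.Dict.getD_empty ..]
  rw [PySem.Set.update_empty]
  simp only [pv_cntD_getD]
  -- B side
  rw [hvals, pv_resD_getD k i, PySem.Dict.getD_empty, zero_add,
    List.filter_map (f := fun b => byt.getD b []), List.length_map]
  rw [hkeys]
  -- compare the two filtered nodup lists
  congr 1
  apply pv_len_filter_eq (PySem.Set.nodup_ofList _) (PySem.Set.nodup_ofList _)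
  intro x
  have hbytx : byt.getD x [] = (P.filter (fun p => p.2 == x)).map (·.1) := by
    rw [hbyt, pv_bytD_getD, PySem.Dict.getD_empty]; simp
  constructor
  · rintro ⟨hmem, hq⟩
    have hx : (i, x) ∈ P := by
      rcases List.mem_map.1 ((PySem.Set.mem_ofList _ _).1 hmem) with ⟨p, hpf, hpx⟩
      rcases List.mem_filter.1 hpf with ⟨hpP, hpi⟩
      have : p = (i, x) := by
        obtain ⟨p1, p2⟩ := p
        simp only at hpx
        simp only [beq_iff_eq] at hpi
        simp [hpi, hpx]
      exact this ▸ hpP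
    refine ⟨(PySem.Set.mem_ofList _ _).2 (List.mem_map.2 ⟨(i, x), hx, rfl⟩), ?_⟩
    simp only [Function.comp, hbytx, Bool.and_eq_true]
    constructor
    · rw [pv_count_len]
      simpa using (of_decide_eq_true hq)
    · have : i ∈ (P.filter (fun p => p.2 == x)).map (·.1) :=
        List.mem_map.2 ⟨(i, x), List.mem_filter.2 ⟨hx, by simp⟩, rfl⟩
      simp [PySem.Set.contains_eq_listContains, PySem.Set.mem_ofList, this]
  · rintro ⟨hmem, hq⟩
    simp only [Function.comp, hbytx, Bool.and_eq_true] at hq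
    obtain ⟨hqlen, hqmem⟩ := hq
    have hiP : i ∈ (P.filter (fun p => p.2 == x)).map (·.1) := by
      simpa [PySem.Set.contains_eq_listContains, List.contains_iff_mem,
        PySem.Set.mem_ofList] using hqmem
    have hx : (i, x) ∈ P := by
      rcases List.mem_map.1 hiP with ⟨p, hpf, hpi⟩
      rcases List.mem_filter.1 hpf with ⟨hpP, hpx⟩
      have : p = (i, x) := by
        obtain ⟨p1, p2⟩ := p
        simp only at hpi
        simp only [beq_iff_eq] at hpx
        simp [hpi, hpx]
      exact this ▸ hpP
    refine ⟨(PySem.Set.mem_ofList _ _).2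
      (List.mem_map.2 ⟨(i, x), List.mem_filter.2 ⟨hx, by simp⟩, rfl⟩), ?_⟩
    rw [pv_count_len] at hqlen
    simpa using (of_decide_eq_true hqlen)
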